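-- pv_equiv track=rewrite | github.com/manhnguyen41/FoodRecommender | utils.py | create_recipe_mapping
-- ===== SOURCE A (Python) =====
-- def create_recipe_mapping(recipes):
--     """
--     Tạo mapping cho recipe name to id
--     """
--     rec_name_to_rec_id = {}
--     for recipe in recipes:
--         rec_name = recipe["name"]
--         rec_id = recipe["id"]
--         if rec_name not in rec_name_to_rec_id:
--             rec_name_to_rec_id[rec_name] = rec_id
--     return rec_name_to_rec_id
-- ===== SOURCE B (Python) =====
-- def create_recipe_mapping(recipes):
--     """
--     Two staged passes instead of a guarded accumulator loop: first compute the
--     distinct recipe names in first-occurrence order (dict.fromkeys), then for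
--     each distinct name scan the recipes for the id of its first occurrence.
--     """
--     recipes = list(recipes)
--     names = dict.fromkeys(r["name"] for r in recipes)
--     return {name: next(r["id"] for r in recipes if r["name"] == name)
--             for name in names}
-- ===== Notes on version B (the rewrite author's own statement) =====
-- stated objective: alternative
-- what changed: Replaces A's single guarded accumulator loop by two staged passes: compute the distinct names in first-occurrence order, then for each distinct name a separate inner scan finds the id of its first occurrence.
import Mathlib
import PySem

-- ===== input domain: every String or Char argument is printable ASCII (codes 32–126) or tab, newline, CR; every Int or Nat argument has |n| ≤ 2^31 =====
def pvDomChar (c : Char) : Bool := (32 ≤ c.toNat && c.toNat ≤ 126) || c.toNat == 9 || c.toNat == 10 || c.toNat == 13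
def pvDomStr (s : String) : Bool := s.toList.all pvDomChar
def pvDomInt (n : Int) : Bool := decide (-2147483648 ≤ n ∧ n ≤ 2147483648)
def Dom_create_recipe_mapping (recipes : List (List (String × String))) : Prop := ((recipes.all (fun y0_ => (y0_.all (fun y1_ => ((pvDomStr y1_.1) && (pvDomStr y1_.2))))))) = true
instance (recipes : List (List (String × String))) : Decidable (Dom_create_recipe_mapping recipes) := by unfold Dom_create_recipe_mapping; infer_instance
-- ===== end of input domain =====

-- B replaces A's single guarded accumulator loop by two staged passes: distinct names first, then an inner scan per name for its first id (alternative decomposition, not faster).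

-- ===== PORT A =====
-- the body of A's loop: guard 'rec_name not in dict' then insert
def pvStepA (d : PySem.Dict String String) (n i : String) : PySem.Dict String String :=
  if d.contains n then d else d.insert n i

-- the loop of A: thread the dict through the recipes; none as soon as a KeyError occurs
def pvGoA : List (List (String × String)) → PySem.Dict String String → Option (PySem.Dict String String)
  | [], d => some d
  | r :: rest, d =>
    match (PySem.Dict.mk r).get? "name" with
    | none => none
    | some n =>
      match (PySem.Dict.mk r).get? "id" with
      | none => none
      | some i => pvGoA rest (pvStepA d n i)

def create_recipe_mapping (recipes : List (List (String × String))) : List (String × String) :=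
  ((pvGoA recipes PySem.Dict.empty).getD PySem.Dict.empty).items

-- ===== PORT B =====
-- the generator (r["name"] for r in recipes); none = KeyError
def pvNamesB : List (List (String × String)) → Option (List String)
  | [] => some []
  | r :: rest =>
    match (PySem.Dict.mk r).get? "name" with
    | none => none
    | some n => (pvNamesB rest).map (fun ns => n :: ns)

-- next(r["id"] for r in recipes if r["name"] == name); none = KeyError/StopIteration
def pvFirstId (name : String) : List (List (String × String)) → Option String
  | [] => none
  | r :: rest =>
    match (PySem.Dict.mk r).get? "name" with
    | none => none
    | some n => if n == name then (PySem.Dict.mk r).get? "id" else pvFirstId name rest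

-- the dict comprehension over the distinct names; none = a KeyError inside
def pvBuildB (recipes : List (List (String × String))) : List String → Option (List (String × String))
  | [] => some []
  | n :: ns =>
    match pvFirstId n recipes with
    | none => none
    | some i => (pvBuildB recipes ns).map (fun kvs => (n, i) :: kvs)

def create_recipe_mapping_alt (recipes : List (List (String × String))) : List (String × String) :=
  match pvNamesB recipes with
  | none => []
  | some names =>
    match pvBuildB recipes (PySem.List.dedup names) with
    | none => []
    | some kvs => (PySem.Dict.ofList kvs).items

-- ===== PRECONDITION & SPEC =====
-- Pre_ excludes exactly the inputs where A raises KeyError: some recipe lacks a "name" or "id" key.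
def Pre_create_recipe_mapping (recipes : List (List (String × String))) : Prop :=
  (recipes.all (fun r => (PySem.Dict.mk r).contains "name" && (PySem.Dict.mk r).contains "id")) = true

instance (recipes : List (List (String × String))) : Decidable (Pre_create_recipe_mapping recipes) := by
  unfold Pre_create_recipe_mapping; infer_instance

def pvWitness_create_recipe_mapping : (List (List (String × String))) :=
  [[("name", "cake"), ("id", "1")], [("name", "soup"), ("id", "2")], [("name", "cake"), ("id", "3")]]

def Spec_create_recipe_mapping (recipes : List (List (String × String))) (out : List (String × String)) : Prop := out = create_recipe_mapping_alt recipes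
instance (recipes : List (List (String × String))) (out : List (String × String)) : Decidable (Spec_create_recipe_mapping recipes out) := by unfold Spec_create_recipe_mapping; infer_instance

-- ===== CLAIM (what is proved, stated in full; the proofs are below) =====
def Claim_equal_create_recipe_mapping : Prop := ∀ (recipes : List (List (String × String))), Dom_create_recipe_mapping recipes → Pre_create_recipe_mapping recipes → Spec_create_recipe_mapping recipes (create_recipe_mapping recipes)

-- ===== LEMMAS AND PROOFS =====

-- the (name, id) pairs of the recipes, as one option-threaded list (proof helper)
def pvPairs : List (List (String × String)) → Option (List (String × String))
  | [] => some []
  | r :: rest =>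
    match (PySem.Dict.mk r).get? "name" with
    | none => none
    | some n =>
      match (PySem.Dict.mk r).get? "id" with
      | none => none
      | some i => (pvPairs rest).map (fun ps => (n, i) :: ps)

-- A's loop as a fold over the extracted pairs
def pvFoldA (d : PySem.Dict String String) (ps : List (String × String)) : PySem.Dict String String :=
  ps.foldl (fun d p => pvStepA d p.1 p.2) d

-- first-occurrence sieve with an accumulated seen-set
def pvSieve (seen : List String) : List (String × String) → List (String × String)
  | [] => []
  | (n, i) :: ps => if seen.contains n then pvSieve seen ps else (n, i) :: pvSieve (seen ++ [n]) ps

-- first-occurrence dedup with an accumulated seen-set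
def pvDed (seen : List String) : List String → List String
  | [] => []
  | n :: ns => if seen.contains n then pvDed seen ns else n :: pvDed (seen ++ [n]) ns

theorem pvGoA_eq_pairs (recipes : List (List (String × String))) (d : PySem.Dict String String) :
    pvGoA recipes d = (pvPairs recipes).map (fun ps => pvFoldA d ps) := by
  induction recipes generalizing d with
  | nil => simp [pvGoA, pvPairs, pvFoldA]
  | cons r rest ih =>
    cases hn : (PySem.Dict.mk r).get? "name" with
    | none => simp [pvGoA, pvPairs, hn]
    | some n =>
      cases hi : (PySem.Dict.mk r).get? "id" with
      | none => simp [pvGoA, pvPairs, hn, hi]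
      | some i =>
        simp only [pvGoA, pvPairs, hn, hi, ih]
        cases pvPairs rest with
        | none => rfl
        | some ps => simp [pvFoldA]

theorem pvFoldA_items (ps : List (String × String)) (d : PySem.Dict String String)
    (h : d.keys.Nodup) : (pvFoldA d ps).items = d.items ++ pvSieve d.keys ps := by
  induction ps generalizing d with
  | nil => simp [pvFoldA, pvSieve]
  | cons p ps ih =>
    obtain ⟨n, i⟩ := p
    rw [show pvFoldA d ((n, i) :: ps) = pvFoldA (pvStepA d n i) ps from rfl]
    by_cases hc : d.contains n = true
    · have hkm : n ∈ d.keys := (PySem.Dict.contains_iff_mem_keys d n).mp hc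
      rw [show pvStepA d n i = d from by unfold pvStepA; rw [if_pos hc]]
      rw [ih d h]
      simp [pvSieve, hkm]
    · have hc' : d.contains n = false := by simpa using hc
      have hkm : n ∉ d.keys := fun hm => hc ((PySem.Dict.contains_iff_mem_keys d n).mpr hm)
      rw [show pvStepA d n i = d.insert n i from by unfold pvStepA; rw [if_neg hc]]
      rw [ih (d.insert n i) (PySem.Dict.nodup_keys_insert d n i h)]
      rw [PySem.Dict.items_insert_of_not_contains d i hc',
        PySem.Dict.keys_insert_of_not_contains d i hc']
      simp [pvSieve, hkm]

theorem pvSieve_cons (seen : List String) (n i : String) (ps : List (String × String)) :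
    pvSieve seen ((n, i) :: ps)
      = if seen.contains n then pvSieve seen ps
        else (n, i) :: pvSieve (seen ++ [n]) ps := rfl

theorem pvSieve_fresh_nodup (ps : List (String × String)) (seen : List String) :
    ((pvSieve seen ps).map Prod.fst).Nodup ∧
      ∀ n ∈ (pvSieve seen ps).map Prod.fst, n ∉ seen := by
  induction ps generalizing seen with
  | nil => simp [pvSieve]
  | cons p ps ih =>
    obtain ⟨n, i⟩ := p
    by_cases hc : n ∈ seen
    · have hb : seen.contains n = true := by simpa using hc
      simpa [pvSieve_cons, hb, hc] using ih seen
    · have hb : seen.contains n = false := by simpa using hc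
      obtain ⟨hnd, hfresh⟩ := ih (seen ++ [n])
      constructor
      · simp only [pvSieve_cons, hb, Bool.false_eq_true, if_false, List.map_cons, List.nodup_cons]
        refine ⟨fun hmem => ?_, hnd⟩
        have := hfresh n hmem
        simp at this
      · intro m hm
        simp only [pvSieve_cons, hb, Bool.false_eq_true, if_false, List.map_cons,
          List.mem_cons] at hm
        rcases hm with rfl | hm
        · exact hc
        · have := hfresh m hm
          simp only [List.mem_append, not_or] at this
          exact this.1

theorem pvDed_mem (ns : List String) (seen : List String) :
    ∀ m ∈ pvDed seen ns, m ∈ ns ∧ m ∉ seen := by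
  induction ns generalizing seen with
  | nil => simp [pvDed]
  | cons n ns ih =>
    intro m hm
    by_cases hc : n ∈ seen
    · have hb : seen.contains n = true := by simpa using hc
      simp only [pvDed, hb, if_true] at hm
      obtain ⟨h1, h2⟩ := ih seen m hm
      exact ⟨List.mem_cons_of_mem _ h1, h2⟩
    · have hb : seen.contains n = false := by simpa using hc
      simp only [pvDed, hb, Bool.false_eq_true, if_false, List.mem_cons] at hm
      rcases hm with rfl | hm
      · exact ⟨List.mem_cons_self, hc⟩
      · obtain ⟨h1, h2⟩ := ih (seen ++ [n]) m hm
        simp only [List.mem_append, not_or] at h2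
        exact ⟨List.mem_cons_of_mem _ h1, h2.1⟩

-- set(xs)-style foldl-add deduplication is pvDed
theorem pvFoldAdd_eq_ded (ns : List String) (seen : List String) :
    ns.foldl PySem.Set.add seen = seen ++ pvDed seen ns := by
  induction ns generalizing seen with
  | nil => simp [pvDed]
  | cons n ns ih =>
    by_cases hc : n ∈ seen
    · have hb : seen.contains n = true := by simpa using hc
      rw [List.foldl_cons, PySem.Set.add_eq_ite, if_pos hc, ih]
      simp only [pvDed, hb, if_true]
    · have hb : seen.contains n = false := by simpa using hc
      rw [List.foldl_cons, PySem.Set.add_eq_ite, if_neg hc, ih]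
      simp only [pvDed, hb, Bool.false_eq_true, if_false]
      simp

theorem pvDedup_eq_ded (ns : List String) : PySem.List.dedup ns = pvDed [] ns := by
  rw [PySem.List.dedup_eq_ofList, PySem.Set.ofList_eq_foldl]
  simpa using pvFoldAdd_eq_ded ns []

-- the sieve is the dedup of the names, each paired with its FIRST id in ps
theorem pvSieve_eq_ded_map (ps : List (String × String)) (seen : List String) :
    pvSieve seen ps = (pvDed seen (ps.map Prod.fst)).map
      (fun n => (n, ((ps.find? (fun p => p.1 == n)).map Prod.snd).getD "")) := by
  induction ps generalizing seen with
  | nil => simp [pvSieve, pvDed]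
  | cons p ps ih =>
    obtain ⟨n, i⟩ := p
    by_cases hc : n ∈ seen
    · have hb : seen.contains n = true := by simpa using hc
      rw [pvSieve_cons, if_pos hb, List.map_cons]
      simp only [pvDed, hb, if_true]
      rw [ih seen]
      refine List.map_congr_left (fun m hm => ?_)
      obtain ⟨_, hms⟩ := pvDed_mem _ _ m hm
      have hne : (n == m) = false := by
        refine beq_eq_false_iff_ne.mpr (fun h => hms ?_)
        rw [← h]; exact hc
      simp [hne]
    · have hb : seen.contains n = false := by simpa using hc
      rw [pvSieve_cons, if_neg (by simpa using hc), List.map_cons]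
      simp only [pvDed, hb, Bool.false_eq_true, if_false, List.map_cons]
      rw [ih (seen ++ [n])]
      refine congrArg₂ _ (by simp) (List.map_congr_left (fun m hm => ?_))
      obtain ⟨_, hms⟩ := pvDed_mem _ _ m hm
      have hne : (n == m) = false := by
        refine beq_eq_false_iff_ne.mpr (fun h => hms ?_)
        rw [← h]; simp
      simp [hne]

theorem pvNamesB_eq (recipes : List (List (String × String))) (ps : List (String × String))
    (h : pvPairs recipes = some ps) : pvNamesB recipes = some (ps.map Prod.fst) := by
  induction recipes generalizing ps with
  | nil =>
    simp only [pvPairs, Option.some.injEq] at h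
    subst h; simp [pvNamesB]
  | cons r rest ih =>
    cases hn : (PySem.Dict.mk r).get? "name" with
    | none => rw [pvPairs, hn] at h; exact absurd h (by simp)
    | some n =>
      cases hi : (PySem.Dict.mk r).get? "id" with
      | none => rw [pvPairs, hn, hi] at h; exact absurd h (by simp)
      | some i =>
        rw [pvPairs, hn, hi] at h
        cases hps : pvPairs rest with
        | none => rw [hps] at h; exact absurd h (by simp)
        | some ps' =>
          rw [hps] at h
          simp only [Option.map_some, Option.some.injEq] at h
          subst h
          rw [pvNamesB, hn, ih ps' hps]
          simp

theorem pvFirstId_eq (recipes : List (List (String × String))) (ps : List (String × String))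
    (h : pvPairs recipes = some ps) (name : String) :
    pvFirstId name recipes = (ps.find? (fun p => p.1 == name)).map Prod.snd := by
  induction recipes generalizing ps with
  | nil =>
    simp only [pvPairs, Option.some.injEq] at h
    subst h; simp [pvFirstId]
  | cons r rest ih =>
    cases hn : (PySem.Dict.mk r).get? "name" with
    | none => rw [pvPairs, hn] at h; exact absurd h (by simp)
    | some n =>
      cases hi : (PySem.Dict.mk r).get? "id" with
      | none => rw [pvPairs, hn, hi] at h; exact absurd h (by simp)
      | some i =>
        rw [pvPairs, hn, hi] at h
        cases hps : pvPairs rest with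
        | none => rw [hps] at h; exact absurd h (by simp)
        | some ps' =>
          rw [hps] at h
          simp only [Option.map_some, Option.some.injEq] at h
          subst h
          simp only [pvFirstId, hn]
          by_cases he : n == name
          · rw [if_pos he, List.find?_cons_of_pos (by simpa using he), hi]
            simp
          · rw [if_neg he, List.find?_cons_of_neg (by simpa using he), ih ps' hps]

theorem pvBuildB_eq (recipes : List (List (String × String))) (ps : List (String × String))
    (hps : pvPairs recipes = some ps) (ns : List String) (hmem : ∀ n ∈ ns, n ∈ ps.map Prod.fst) :
    pvBuildB recipes ns = some (ns.map
      (fun n => (n, ((ps.find? (fun p => p.1 == n)).map Prod.snd).getD ""))) := by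
  induction ns with
  | nil => simp [pvBuildB]
  | cons n ns ih =>
    have hn : n ∈ ps.map Prod.fst := hmem n List.mem_cons_self
    obtain ⟨p, hp, hpn⟩ := List.mem_map.mp hn
    have hfind : (ps.find? (fun p => p.1 == n)).isSome :=
      List.find?_isSome.mpr ⟨p, hp, by simp [hpn]⟩
    obtain ⟨q, hq⟩ := Option.isSome_iff_exists.mp hfind
    rw [pvBuildB, pvFirstId_eq recipes ps hps n, hq,
      ih (fun m hm => hmem m (List.mem_cons_of_mem _ hm))]
    simp [hq]

theorem pvPairs_isSome (recipes : List (List (String × String)))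
    (h : Pre_create_recipe_mapping recipes) : (pvPairs recipes).isSome := by
  induction recipes with
  | nil => simp [pvPairs]
  | cons r rest ih =>
    unfold Pre_create_recipe_mapping at h
    simp only [List.all_cons, Bool.and_eq_true] at h
    obtain ⟨⟨hn, hi⟩, hrest⟩ := h
    rw [PySem.Dict.contains_eq_isSome_get?] at hn hi
    unfold pvPairs
    cases hgn : (PySem.Dict.mk r).get? "name" with
    | none => rw [hgn] at hn; simp at hn
    | some n =>
      cases hgi : (PySem.Dict.mk r).get? "id" with
      | none => rw [hgi] at hi; simp at hi
      | some i =>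
        have := ih hrest
        cases hps : pvPairs rest with
        | none => rw [hps] at this; simp at this
        | some ps => simp

-- ===== VERDICT (by name: the statement is the Claim_ definition above) =====
theorem create_recipe_mapping_spec : Claim_equal_create_recipe_mapping := by
  intro recipes _ hpre
  unfold Spec_create_recipe_mapping create_recipe_mapping create_recipe_mapping_alt
  have hsome := pvPairs_isSome recipes hpre
  cases hps : pvPairs recipes with
  | none => rw [hps] at hsome; simp at hsome
  | some ps =>
    rw [pvGoA_eq_pairs, hps]
    simp only [Option.map_some, Option.getD_some]
    rw [pvFoldA_items ps PySem.Dict.empty PySem.Dict.nodup_keys_empty]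
    rw [pvNamesB_eq recipes ps hps]
    simp only
    rw [pvDedup_eq_ded]
    rw [pvBuildB_eq recipes ps hps (pvDed [] (ps.map Prod.fst))
      (fun n hn => (pvDed_mem _ _ n hn).1)]
    simp only
    rw [← pvSieve_eq_ded_map ps []]
    obtain ⟨hnd, _⟩ := pvSieve_fresh_nodup ps []
    rw [PySem.Dict.ofList, PySem.Dict.update]
    have hitems := PySem.Dict.items_foldl_insert_fresh (pvSieve [] ps) Prod.fst Prod.snd
      PySem.Dict.empty (fun a _ => PySem.Dict.contains_empty _) hnd
    simpa using hitems.symm
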